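-- pv_equiv track=rewrite | github.com/gajanlee/syllabus | wsln_min/convert_text_to_triplets_for_gy.py | normalize_node
-- ===== SOURCE A (Python) =====
-- def normalize_node(text):
--     new_text = ''
--     for char in text.lower().strip():
--         if char == ' ':
--             new_text += '_'
--         elif 'a' <= char <= 'z':
--             new_text += char
--
--     return new_text.strip('_ ')
-- ===== SOURCE B (Python) =====
-- def normalize_node(text):
--     # One streaming pass over the raw text: lowercase by ord arithmetic, buffer
--     # interior spaces as pending underscores flushed only before a later letter,
--     # so no strip()/lower() preprocessing or final strip is needed.
--     out = []
--     pending = 0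
--     for ch in text:
--         o = ord(ch)
--         if 65 <= o <= 90:
--             o += 32
--         if 97 <= o <= 122:
--             out.append('_' * pending)
--             out.append(chr(o))
--             pending = 0
--         elif o == 32 and out:
--             pending += 1
--     return ''.join(out)
-- ===== Notes on version B (the rewrite author's own statement) =====
-- stated objective: alternative
-- what changed: Replaces lower/strip preprocessing, a whitelist-filter loop and a final two-ended strip by a single streaming pass that lowercases via ord arithmetic and buffers interior spaces as pending underscores flushed only before a later letter, so stripping never happens.
import Mathlib
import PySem

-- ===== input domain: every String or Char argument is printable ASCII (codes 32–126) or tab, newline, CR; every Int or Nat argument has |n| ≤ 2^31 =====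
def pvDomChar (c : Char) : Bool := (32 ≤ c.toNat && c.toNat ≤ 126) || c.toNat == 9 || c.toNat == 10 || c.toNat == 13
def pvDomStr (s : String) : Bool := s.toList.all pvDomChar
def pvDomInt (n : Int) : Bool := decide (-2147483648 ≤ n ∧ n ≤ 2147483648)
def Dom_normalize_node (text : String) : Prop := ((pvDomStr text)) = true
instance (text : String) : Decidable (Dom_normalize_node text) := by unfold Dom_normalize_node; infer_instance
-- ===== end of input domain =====

-- B replaces A's lower/strip preprocessing, whitelist-filter loop and final two-ended strip
-- by one streaming pass that buffers interior spaces as pending underscores (objective: alternative).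

-- ===== PORT A =====
-- A's loop body: '_' for a space, keep lowercase letters, drop everything else
def stepA (acc : String) (ch : Char) : String :=
  if ch = ' ' then acc ++ "_"
  else if 'a' ≤ ch ∧ ch ≤ 'z' then acc.push ch
  else acc

def normalize_node (text : String) : String :=
  let s := PySem.Str.strip (PySem.Str.lower text)
  let new_text := s.toList.foldl stepA ""
  PySem.Str.stripChars new_text "_ "

-- ===== PORT B =====
-- B's loop body over state (out, pending): lowercase by ord arithmetic, flush
-- pending underscores before a letter, count interior spaces only after a letter
def stepB (st : List Char × Nat) (ch : Char) : List Char × Nat :=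
  let o := ch.toNat
  let o := if 65 ≤ o ∧ o ≤ 90 then o + 32 else o
  if 97 ≤ o ∧ o ≤ 122 then (st.1 ++ List.replicate st.2 '_' ++ [Char.ofNat o], 0)
  else if o = 32 ∧ st.1 ≠ [] then (st.1, st.2 + 1)
  else st

def normalize_node_alt (text : String) : String :=
  let st := text.toList.foldl stepB ([], 0)
  String.ofList st.1

-- ===== PRECONDITION & SPEC =====
def Spec_normalize_node (text : String) (out : String) : Prop := out = normalize_node_alt text
instance (text : String) (out : String) : Decidable (Spec_normalize_node text out) := by unfold Spec_normalize_node; infer_instance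

-- ===== CLAIM (what is proved, stated in full; the proofs are below) =====
def Claim_equal_normalize_node : Prop := ∀ (text : String), Dom_normalize_node text → Spec_normalize_node text (normalize_node text)

-- ===== LEMMAS AND PROOFS =====

-- the char predicate stripChars "_ " strips with
def uu (c : Char) : Bool := ['_', ' '].contains c
-- A's per-char whitelist map
def h0 (c : Char) : Option Char :=
  if c = ' ' then some '_' else if 'a' ≤ c ∧ c ≤ 'z' then some c else none
-- both-ends strip of uu-chars, as stripChars computes it
def sc (m : List Char) : List Char :=
  (List.dropWhile uu (List.dropWhile uu m).reverse).reverse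
-- B's lowered char code
def oArith (c : Char) : ℕ := if 65 ≤ c.toNat ∧ c.toNat ≤ 90 then c.toNat + 32 else c.toNat

theorem chInj {c d : Char} (h : c.toNat = d.toNat) : c = d :=
  Char.ext (UInt32.toNat_inj.mp h)

theorem chLe {c d : Char} : (c ≤ d) ↔ (c.toNat ≤ d.toNat) := by
  rw [Char.le_def, UInt32.le_iff_toNat_le]; rfl

theorem toNat_ofNat_small {n : ℕ} (h : n ≤ 130) : (Char.ofNat n).toNat = n := by
  rw [Char.toNat_ofNat, if_pos]; left; omega

theorem uu_eq (c : Char) : uu c = (decide (c.toNat = 95) || decide (c.toNat = 32)) := by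
  by_cases h1 : c.toNat = 95
  · have h := chInj (d := '_') h1; subst h; rfl
  · by_cases h2 : c.toNat = 32
    · have h := chInj (d := ' ') h2; subst h; rfl
    · have n1 : c ≠ '_' := fun h => h1 (by rw [h]; rfl)
      have n2 : c ≠ ' ' := fun h => h2 (by rw [h]; rfl)
      simp [uu, n1, n2, h1, h2]

theorem h0_eq (c : Char) :
    h0 c = (if c.toNat = 32 then some '_'
            else if 97 ≤ c.toNat ∧ c.toNat ≤ 122 then some c else none) := by
  unfold h0
  by_cases h1 : c.toNat = 32
  · have h := chInj (d := ' ') h1; subst h; rfl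
  · rw [if_neg (fun h => h1 (by rw [h]; rfl)), if_neg h1]
    simp only [chLe, show ('a').toNat = 97 from rfl, show ('z').toNat = 122 from rfl]

theorem lowerChar_toNat (c : Char) : (PySem.Chars.lowerChar c).toNat = oArith c := by
  unfold oArith
  simp only [PySem.Chars.lowerChar, PySem.Chars.isupper, chLe, Bool.and_eq_true,
    decide_eq_true_eq, show ('A').toNat = 65 from rfl, show ('Z').toNat = 90 from rfl]
  split_ifs <;> first | exact toNat_ofNat_small (by omega) | omega

-- classification of B's branch tests against A's whitelist map of the lowered char
theorem clsA (c : Char) (h : 97 ≤ oArith c ∧ oArith c ≤ 122) :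
    h0 (PySem.Chars.lowerChar c) = some (Char.ofNat (oArith c)) := by
  rw [h0_eq, lowerChar_toNat, if_neg (by omega), if_pos h]
  exact congrArg some (chInj (by rw [lowerChar_toNat, toNat_ofNat_small (by omega)]))

theorem clsB (c : Char) (h : oArith c = 32) :
    h0 (PySem.Chars.lowerChar c) = some '_' ∧ c.toNat = 32 := by
  have hc : c.toNat = 32 := by unfold oArith at h; split_ifs at h <;> omega
  exact ⟨by rw [h0_eq, lowerChar_toNat, if_pos h], hc⟩

theorem clsC (c : Char) (h1 : ¬(97 ≤ oArith c ∧ oArith c ≤ 122)) (h2 : oArith c ≠ 32) :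
    h0 (PySem.Chars.lowerChar c) = none := by
  rw [h0_eq, lowerChar_toNat, if_neg h2, if_neg h1]

-- A's loop computes the filterMap of h0
theorem loopA (cs : List Char) : ∀ acc : String,
    (cs.foldl stepA acc).toList = acc.toList ++ cs.filterMap h0 := by
  induction cs with
  | nil => intro acc; simp
  | cons c cs ih =>
    intro acc
    simp only [List.foldl_cons, stepA]
    by_cases h1 : c = ' '
    · rw [if_pos h1, List.filterMap_cons_some (b := '_') (by simp [h0, h1]), ih]
      simp
    · by_cases h2 : 'a' ≤ c ∧ c ≤ 'z'
      · rw [if_neg h1, if_pos h2, List.filterMap_cons_some (b := c) (by simp [h0, h1, h2]), ih]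
        simp
      · rw [if_neg h1, if_neg h2, List.filterMap_cons_none (by simp [h0, h1, h2]), ih]

theorem dropWhile_all {α : Type} {p : α → Bool} {l : List α} (h : ∀ x ∈ l, p x = true) :
    List.dropWhile p l = [] := List.dropWhile_eq_nil_iff.mpr h

-- stripping ignores uu-padding on both ends
theorem sc_pad (p x q : List Char) (hp : ∀ c ∈ p, uu c = true) (hq : ∀ c ∈ q, uu c = true) :
    sc (p ++ x ++ q) = sc x := by
  unfold sc
  rw [List.append_assoc, List.dropWhile_append, dropWhile_all hp]
  simp only [List.isEmpty_nil, if_pos]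
  rw [List.dropWhile_append]
  by_cases hx : List.dropWhile uu x = []
  · rw [hx]
    simp only [List.isEmpty_nil, reduceIte]
    rw [dropWhile_all (fun c hc => hq c ((List.dropWhile_sublist uu).subset (List.mem_reverse.mp hc)))]
    simp
  · rw [if_neg (by simpa [List.isEmpty_iff] using hx)]
    rw [List.reverse_append, List.dropWhile_append,
        dropWhile_all (fun c hc => hq c (List.mem_reverse.mp hc))]
    simp

-- dropping uu-chars from the right end of a non-uu-headed list keeps the head
theorem rstrip_cons {a : Char} (x : List Char) (ha : uu a = false) :
    (List.dropWhile uu (a :: x).reverse).reverse = a :: (List.dropWhile uu x.reverse).reverse := by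
  rw [List.reverse_cons, List.dropWhile_append]
  by_cases hx : List.dropWhile uu x.reverse = []
  · simp [hx, ha]
  · rw [if_neg (by simpa [List.isEmpty_iff] using hx)]
    simp

-- right-strip of (padding ++ letter-headed tail), seen from the reversed side
theorem rstrip_pad (x : List Char) (p : ℕ) (a : Char) (ha : uu a = false) :
    (List.dropWhile uu (List.replicate p '_' ++ a :: x).reverse).reverse =
      List.replicate p '_' ++ a :: (List.dropWhile uu x.reverse).reverse := by
  rw [List.reverse_append, List.reverse_cons, List.reverse_replicate, List.append_assoc,
      List.dropWhile_append]
  have h1 : List.dropWhile uu ([a] ++ List.replicate p '_') =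
      [a] ++ List.replicate p '_' := by
    rw [List.singleton_append, List.dropWhile_cons]
    simp [ha]
  by_cases hx : List.dropWhile uu x.reverse = []
  · rw [hx]
    simp only [List.isEmpty_nil, reduceIte]
    rw [h1]
    simp
  · rw [if_neg (by simpa [List.isEmpty_iff] using hx), List.reverse_append,
        List.reverse_append, List.reverse_replicate]
    simp

-- B's fold once a letter has been emitted (out ends in a letter, pending spaces buffered)
theorem loopB1 (l : List Char) : ∀ (out : List Char) (pending : ℕ),
    out ≠ [] →
    (l.foldl stepB (out, pending)).1 =
      out ++ (List.dropWhile uu (List.replicate pending '_' ++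
        l.filterMap (fun c => h0 (PySem.Chars.lowerChar c))).reverse).reverse := by
  induction l with
  | nil =>
    intro out pending _
    simp only [List.foldl_nil, List.filterMap_nil, List.append_nil, List.reverse_replicate]
    rw [dropWhile_all (fun c hc => by rw [List.eq_of_mem_replicate hc, uu_eq]; rfl)]
    simp
  | cons c l ih =>
    intro out pending hout
    simp only [List.foldl_cons, stepB]
    simp only [show (if 65 ≤ c.toNat ∧ c.toNat ≤ 90 then c.toNat + 32 else c.toNat) = oArith c
      from rfl]
    by_cases hlet : 97 ≤ oArith c ∧ oArith c ≤ 122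
    · rw [if_pos hlet, List.filterMap_cons_some (f := fun c => h0 (PySem.Chars.lowerChar c)) (clsA c hlet),
        ih _ _ (by simp), rstrip_pad _ _ _
          (by rw [uu_eq, toNat_ofNat_small (by omega)]
              simp only [Bool.or_eq_false_iff, decide_eq_false_iff_not]
              omega)]
      simp [List.append_assoc]
    · rw [if_neg hlet]
      by_cases hsp : oArith c = 32
      · obtain ⟨hh, _⟩ := clsB c hsp
        rw [if_pos ⟨hsp, hout⟩, List.filterMap_cons_some (f := fun c => h0 (PySem.Chars.lowerChar c)) hh, ih _ _ hout,
          show List.replicate pending '_' ++ '_' ::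
              l.filterMap (fun c => h0 (PySem.Chars.lowerChar c)) =
            List.replicate (pending + 1) '_' ++
              l.filterMap (fun c => h0 (PySem.Chars.lowerChar c)) by
            rw [List.replicate_succ']; simp]
      · rw [if_neg (fun h => hsp h.1), List.filterMap_cons_none (f := fun c => h0 (PySem.Chars.lowerChar c)) (clsC c hlet hsp)]
        exact ih _ _ hout

-- B's fold from the initial state strips both ends
theorem loopB0 (l : List Char) :
    (l.foldl stepB ([], 0)).1 = sc (l.filterMap (fun c => h0 (PySem.Chars.lowerChar c))) := by
  induction l with
  | nil => simp [sc]
  | cons c l ih =>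
    simp only [List.foldl_cons, stepB]
    simp only [show (if 65 ≤ c.toNat ∧ c.toNat ≤ 90 then c.toNat + 32 else c.toNat) = oArith c
      from rfl]
    by_cases hlet : 97 ≤ oArith c ∧ oArith c ≤ 122
    · have hnu : uu (Char.ofNat (oArith c)) = false := by
        rw [uu_eq, toNat_ofNat_small (by omega)]
        simp only [Bool.or_eq_false_iff, decide_eq_false_iff_not]
        omega
      rw [if_pos hlet, List.filterMap_cons_some (f := fun c => h0 (PySem.Chars.lowerChar c)) (clsA c hlet), loopB1 _ _ _ (by simp)]
      unfold sc
      rw [List.dropWhile_cons]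
      simp only [hnu, Bool.false_eq_true, reduceIte]
      rw [rstrip_cons _ hnu]
      simp
    · rw [if_neg hlet]
      by_cases hsp : oArith c = 32
      · obtain ⟨hh, _⟩ := clsB c hsp
        rw [if_neg (by simp), List.filterMap_cons_some (f := fun c => h0 (PySem.Chars.lowerChar c)) hh, ih]
        unfold sc
        rw [List.dropWhile_cons]
        simp [show uu '_' = true from rfl]
      · rw [if_neg (fun h => hsp h.1), List.filterMap_cons_none (f := fun c => h0 (PySem.Chars.lowerChar c)) (clsC c hlet hsp)]
        exact ih

theorem dom_lowerChar {c : Char} (h : pvDomChar c = true) :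
    pvDomChar (PySem.Chars.lowerChar c) = true := by
  simp only [pvDomChar, Bool.or_eq_true, Bool.and_eq_true, decide_eq_true_eq, beq_iff_eq] at h ⊢
  rw [lowerChar_toNat]
  unfold oArith
  split_ifs with hs
  · omega
  · exact h

-- whitespace chars of the domain map by h0 to nothing or to '_', so their images are uu
theorem g_space_uu {w : List Char} (hdom : ∀ c ∈ w, pvDomChar c = true)
    (hsp : ∀ c ∈ w, PySem.Chars.isspace c = true) :
    ∀ x ∈ w.filterMap h0, uu x = true := by
  intro x hx
  obtain ⟨c, hc, hcx⟩ := List.mem_filterMap.mp hx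
  have hdc := hdom c hc
  have hsc := hsp c hc
  simp only [pvDomChar, Bool.or_eq_true, Bool.and_eq_true, decide_eq_true_eq, beq_iff_eq] at hdc
  simp only [PySem.Chars.isspace, Bool.or_eq_true, Bool.and_eq_true, decide_eq_true_eq] at hsc
  rw [h0_eq] at hcx
  split_ifs at hcx with h1 h2
  all_goals first
  | (rw [← Option.some_inj.mp hcx, uu_eq]; rfl)
  | omega

-- every list is its strip padded by whitespace on both ends
theorem strip_decomp (m : List Char) :
    ∃ p q, (∀ c ∈ p, PySem.Chars.isspace c = true) ∧ (∀ c ∈ q, PySem.Chars.isspace c = true) ∧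
      m = p ++ PySem.Chars.strip m ++ q := by
  refine ⟨List.takeWhile PySem.Chars.isspace m,
    (List.takeWhile PySem.Chars.isspace (List.dropWhile PySem.Chars.isspace m).reverse).reverse,
    fun c hc => List.mem_takeWhile_imp hc,
    fun c hc => List.mem_takeWhile_imp (List.mem_reverse.mp hc), ?_⟩
  simp only [PySem.Chars.strip, PySem.Chars.lstrip, PySem.Chars.rstrip]
  conv_lhs => rw [← List.takeWhile_append_dropWhile (p := PySem.Chars.isspace) (l := m)]
  rw [List.append_assoc]
  congr 1
  conv_lhs => rw [← List.reverse_reverse (List.dropWhile PySem.Chars.isspace m),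
    ← List.takeWhile_append_dropWhile (p := PySem.Chars.isspace)
      (l := (List.dropWhile PySem.Chars.isspace m).reverse)]
  rw [List.reverse_append]

-- ===== VERDICT (by name: the statement is the Claim_ definition above) =====
theorem normalize_node_spec : Claim_equal_normalize_node := by
  intro text hdom
  unfold Spec_normalize_node normalize_node normalize_node_alt
  have hdl : ∀ c ∈ text.toList, pvDomChar c = true := by
    unfold Dom_normalize_node pvDomStr at hdom
    exact fun c hc => List.all_eq_true.mp hdom c hc
  apply String.toList_inj.mp
  rw [String.toList_ofList, PySem.Str.toList_stripChars, loopA]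
  rw [PySem.Str.toList_strip, PySem.Str.toList_lower]
  set m := PySem.Chars.lower text.toList with hm
  have hdm : ∀ c ∈ m, pvDomChar c = true := by
    intro c hc
    rw [hm, PySem.Chars.lower, List.mem_map] at hc
    obtain ⟨d, hd, rfl⟩ := hc
    exact dom_lowerChar (hdl d hd)
  obtain ⟨p, q, hp, hq, hdecomp⟩ := strip_decomp m
  have hps : ∀ c ∈ p, pvDomChar c = true := fun c hc => hdm c (hdecomp ▸ (by simp [hc]))
  have hqs : ∀ c ∈ q, pvDomChar c = true := fun c hc => hdm c (hdecomp ▸ (by simp [hc]))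
  have key : PySem.Chars.stripChars (List.filterMap h0 (PySem.Chars.strip m)) "_ ".toList
      = sc (List.filterMap h0 m) := by
    have h1 : PySem.Chars.stripChars (List.filterMap h0 (PySem.Chars.strip m)) "_ ".toList
        = sc (List.filterMap h0 (PySem.Chars.strip m)) := rfl
    rw [h1]
    conv_rhs => rw [hdecomp]
    rw [List.filterMap_append, List.filterMap_append,
      sc_pad _ _ _ (g_space_uu hps hp) (g_space_uu hqs hq)]
  rw [show ("".toList : List Char) = [] from rfl, List.nil_append, key]
  rw [hm, PySem.Chars.lower, List.filterMap_map]
  rw [loopB0 text.toList]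
  rfl
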